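-- pv_equiv track=rewrite | github.com/yopo4/Cours | Cours_Python/cours6/ex1.py | longMin
-- ===== SOURCE A (Python) =====
-- def longMin(mdp):
--     l = []
--     maxSequence = 0
--     for i in mdp:
--         if i.islower():
--             maxSequence += 1
--         else:
--             l.append(maxSequence)
--             maxSequence = 0
--
--     for i in range(len(l) - 1):
--         if maxSequence <= l[i]:
--             maxSequence = l[i]
--     return maxSequence
-- ===== SOURCE B (Python) =====
-- # Single-pass running maximum of the current lowercase-run length: no auxiliary
-- # list of run lengths and no second scan (objective: simpler).
-- def longMin(mdp):
--     best = 0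
--     cur = 0
--     for c in mdp:
--         if c.islower():
--             cur += 1
--             if cur > best:
--                 best = cur
--         else:
--             cur = 0
--     return best
-- ===== Notes on version B (the rewrite author's own statement) =====
-- stated objective: simpler
-- what changed: B keeps a single running maximum of the current lowercase-run length in one pass, instead of A's two phases (collect all completed run lengths into a list, then scan that list a second time to take a maximum that skips its last entry).
-- intended difference: On inputs whose last completed lowercase run (the run ending at the last non-lowercase character) is strictly longer than every other run including the trailing one, A skips that run (l[-1]) in its maximum pass and returns a smaller value (e.g. 0 for 'abc.'), while B returns the true longest lowercase run length, which is the intended result of the function. — e.g. on longMin("ab."): A returns 0, B returns 2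
import Mathlib
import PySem

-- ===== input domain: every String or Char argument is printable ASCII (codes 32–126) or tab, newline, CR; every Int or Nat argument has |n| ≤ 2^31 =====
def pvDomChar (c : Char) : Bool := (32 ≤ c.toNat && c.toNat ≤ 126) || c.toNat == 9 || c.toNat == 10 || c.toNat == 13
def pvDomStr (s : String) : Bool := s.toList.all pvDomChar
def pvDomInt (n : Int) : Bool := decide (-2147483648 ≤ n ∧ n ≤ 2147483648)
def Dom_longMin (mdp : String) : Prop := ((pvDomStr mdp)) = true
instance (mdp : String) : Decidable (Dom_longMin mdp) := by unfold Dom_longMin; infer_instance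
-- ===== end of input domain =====

-- B replaces A's collect-runs-then-rescan with a one-pass running maximum (simpler);
-- where A's second pass skips the last completed run, B returns the true longest run (see D_ below).

-- ===== PORT A =====
def longMin (mdp : String) : Int :=
  let st := mdp.toList.foldl
    (fun (st : List Int × Int) i =>
      if PySem.Chars.islower i then (st.1, st.2 + 1) else (st.1 ++ [st.2], 0))
    ([], 0)
  (PySem.List.pyRange 0 ((st.1.length : Int) - 1) 1).foldl
    (fun m i => if m ≤ PySem.List.pyGetD st.1 i 0 then PySem.List.pyGetD st.1 i 0 else m)
    st.2

-- ===== PORT B =====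
def longMin_alt (mdp : String) : Int :=
  (mdp.toList.foldl
    (fun (st : Int × Int) c =>
      if PySem.Chars.islower c then
        (if st.2 + 1 > st.1 then st.2 + 1 else st.1, st.2 + 1)
      else (st.1, 0))
    (0, 0)).1

-- ===== PRECONDITION & SPEC =====
-- pvRunLens cs = the lengths of the lowercase runs of cs, split at every non-lowercase
-- character (one entry per segment, so always nonempty; last entry = trailing run).
-- Used only to state D_; it is neither port's code.
def pvRunLens (cs : List Char) : List Int :=
  let p := cs.foldl (fun (p : List Int × Int) c =>
    if PySem.Chars.islower c then (p.1, p.2 + 1) else (p.2 :: p.1, 0)) ([], 0)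
  (p.2 :: p.1).reverse

-- On inputs whose last COMPLETED lowercase run (the run just before the last non-lowercase
-- character, entry n-2 of pvRunLens) is strictly longer than every other run, A's second pass
-- skips that run and returns the smaller maximum of the remaining runs (e.g. 0 on "abc."),
-- while B returns the true longest-lowercase-run length, the intended value.
def D_longMin (mdp : String) : Prop :=
  2 ≤ (pvRunLens mdp.toList).length ∧
    (pvRunLens mdp.toList).getLastD 0 < (pvRunLens mdp.toList).dropLast.getLastD 0 ∧
    ∀ y ∈ (pvRunLens mdp.toList).dropLast.dropLast,
      y < (pvRunLens mdp.toList).dropLast.getLastD 0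
instance (mdp : String) : Decidable (D_longMin mdp) := by unfold D_longMin; infer_instance

def Spec_longMin (mdp : String) (out : Int) : Prop := ¬ D_longMin mdp → out = longMin_alt mdp
instance (mdp : String) (out : Int) : Decidable (Spec_longMin mdp out) := by unfold Spec_longMin; infer_instance

def pvDiffWitness_longMin : String := "ab."
def pvDiffWitnessOut_longMin : Int × Int := (0, 2)

-- ===== CLAIM (what is proved, stated in full; the proofs are below) =====
def Claim_unchanged_longMin : Prop := ∀ (mdp : String), Dom_longMin mdp → Spec_longMin mdp (longMin mdp)
def Claim_changed_longMin : Prop := Dom_longMin (pvDiffWitness_longMin) ∧ D_longMin (pvDiffWitness_longMin) ∧ longMin (pvDiffWitness_longMin) = pvDiffWitnessOut_longMin.1 ∧ longMin_alt (pvDiffWitness_longMin) = pvDiffWitnessOut_longMin.2 ∧ pvDiffWitnessOut_longMin.1 ≠ pvDiffWitnessOut_longMin.2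
def Claim_exact_longMin : Prop := ∀ (mdp : String), Dom_longMin mdp → D_longMin mdp → longMin mdp ≠ longMin_alt mdp

-- ===== LEMMAS AND PROOFS =====

-- proof-side structural version of pvRunLens (recursion on the first character)
def pvRuns : List Char → List Int
  | [] => [0]
  | c :: cs =>
    if PySem.Chars.islower c then
      match pvRuns cs with
      | [] => [1]
      | r :: rs => (r + 1) :: rs
    else 0 :: pvRuns cs

theorem pvRuns_ne_nil (cs : List Char) : pvRuns cs ≠ [] := by
  induction cs with
  | nil => simp [pvRuns]
  | cons c cs ih =>
    simp only [pvRuns]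
    split
    · cases h : pvRuns cs <;> simp
    · simp

theorem pvRuns_nonneg (cs : List Char) : ∀ y ∈ pvRuns cs, 0 ≤ y := by
  induction cs with
  | nil => simp [pvRuns]
  | cons c cs ih =>
    simp only [pvRuns]
    split
    · cases h : pvRuns cs with
      | nil => simp
      | cons r rs =>
        intro y hy
        rcases List.mem_cons.1 hy with h1 | h1
        · have := ih r (by rw [h]; exact List.mem_cons_self)
          omega
        · exact ih y (by rw [h]; exact List.mem_cons_of_mem _ h1)
    · intro y hy
      rcases List.mem_cons.1 hy with h1 | h1
      · omega
      · exact ih y h1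

-- prepend m to the first run length
def pvBump (m : Int) : List Int → List Int
  | [] => []
  | r :: rs => (m + r) :: rs

theorem pvBump_zero (l : List Int) : pvBump 0 l = l := by
  cases l <;> simp [pvBump]

theorem foldA' (cs : List Char) : ∀ (acc : List Int) (m : Int),
    cs.foldl (fun (st : List Int × Int) i =>
        if PySem.Chars.islower i then (st.1, st.2 + 1) else (st.1 ++ [st.2], 0)) (acc, m)
      = (acc ++ (pvBump m (pvRuns cs)).dropLast, (pvBump m (pvRuns cs)).getLastD 0) := by
  induction cs with
  | nil => intro acc m; simp [pvRuns, pvBump]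
  | cons c cs ih =>
    intro acc m
    obtain ⟨r, rs, hrl⟩ := List.exists_cons_of_ne_nil (pvRuns_ne_nil cs)
    rw [List.foldl_cons]
    by_cases hc : PySem.Chars.islower c
    · simp only [hc, if_true]
      rw [ih acc (m + 1)]
      simp only [pvRuns, hc, if_true, hrl]
      have h1 : m + 1 + r = m + (r + 1) := by ring
      simp [pvBump, h1]
    · simp only [hc, Bool.false_eq_true, if_false]
      rw [ih (acc ++ [m]) 0]
      simp only [pvRuns, hc, Bool.false_eq_true, if_false, hrl, pvBump, zero_add,
        add_zero, List.dropLast_cons₂, List.append_assoc, List.cons_append,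
        List.nil_append, List.getLastD_cons]

theorem foldB' (cs : List Char) : ∀ (b c : Int), 0 ≤ c → c ≤ b →
    cs.foldl (fun (st : Int × Int) c =>
        if PySem.Chars.islower c then
          (if st.2 + 1 > st.1 then st.2 + 1 else st.1, st.2 + 1)
        else (st.1, 0)) (b, c)
      = ((pvBump c (pvRuns cs)).foldl max b, (pvBump c (pvRuns cs)).getLastD 0) := by
  induction cs with
  | nil =>
    intro b c h0 hcb
    simp only [pvRuns, pvBump, List.foldl_nil, List.foldl_cons, add_zero,
      List.getLastD_cons, List.getLastD_nil]
    rw [show max b c = b by omega]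
  | cons ch cs ih =>
    intro b c h0 hcb
    obtain ⟨r, rs, hrl⟩ := List.exists_cons_of_ne_nil (pvRuns_ne_nil cs)
    have hr : 0 ≤ r := pvRuns_nonneg cs r (by rw [hrl]; exact List.mem_cons_self)
    rw [List.foldl_cons]
    by_cases hc : PySem.Chars.islower ch
    · simp only [hc, if_true]
      rw [show (if c + 1 > b then c + 1 else b) = max b (c + 1) by omega,
        ih (max b (c + 1)) (c + 1) (by omega) (by omega)]
      simp only [pvRuns, hc, if_true, hrl, pvBump]
      rw [show c + 1 + r = c + (r + 1) by ring]
      simp only [List.foldl_cons]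
      rw [show max (max b (c + 1)) (c + (r + 1)) = max b (c + (r + 1)) by omega]
    · simp only [hc, Bool.false_eq_true, if_false]
      rw [ih b 0 le_rfl (by omega)]
      simp only [pvRuns, hc, Bool.false_eq_true, if_false, hrl, pvBump, zero_add,
        add_zero, List.foldl_cons, List.getLastD_cons]
      rw [show max b c = b by omega]

theorem runsAux (cs : List Char) : ∀ (acc : List Int) (cur : Int),
    (((cs.foldl (fun (p : List Int × Int) c =>
        if PySem.Chars.islower c then (p.1, p.2 + 1) else (p.2 :: p.1, 0)) (acc, cur)).2 ::
      (cs.foldl (fun (p : List Int × Int) c =>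
        if PySem.Chars.islower c then (p.1, p.2 + 1) else (p.2 :: p.1, 0)) (acc, cur)).1).reverse)
      = acc.reverse ++ pvBump cur (pvRuns cs) := by
  induction cs with
  | nil => intro acc cur; simp [pvRuns, pvBump]
  | cons c cs ih =>
    intro acc cur
    obtain ⟨r, rs, hrl⟩ := List.exists_cons_of_ne_nil (pvRuns_ne_nil cs)
    rw [List.foldl_cons]
    by_cases hc : PySem.Chars.islower c
    · simp only [hc, if_true]
      rw [ih acc (cur + 1)]
      simp only [pvRuns, hc, if_true, hrl, pvBump]
      rw [show cur + 1 + r = cur + (r + 1) by ring]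
    · simp only [hc, Bool.false_eq_true, if_false]
      rw [ih (cur :: acc) 0]
      simp [pvRuns, hc, hrl, pvBump]

theorem pvRunLens_eq (cs : List Char) : pvRunLens cs = pvRuns cs := by
  have h := runsAux cs [] 0
  simp only [List.reverse_nil, List.nil_append, pvBump_zero] at h
  exact h

theorem pvRunLens_ne_nil (cs : List Char) : pvRunLens cs ≠ [] := by
  rw [pvRunLens_eq]; exact pvRuns_ne_nil cs

theorem pvRunLens_nonneg (cs : List Char) : ∀ y ∈ pvRunLens cs, 0 ≤ y := by
  rw [pvRunLens_eq]; exact pvRuns_nonneg cs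

-- A's first loop, in terms of the run decomposition
theorem foldA (cs : List Char) : ∀ (acc : List Int) (m : Int),
    cs.foldl (fun (st : List Int × Int) i =>
        if PySem.Chars.islower i then (st.1, st.2 + 1) else (st.1 ++ [st.2], 0)) (acc, m)
      = (acc ++ (pvBump m (pvRunLens cs)).dropLast, (pvBump m (pvRunLens cs)).getLastD 0) := by
  rw [pvRunLens_eq]; exact foldA' cs

-- B's loop, in terms of the run decomposition
theorem foldB (cs : List Char) : ∀ (b c : Int), 0 ≤ c → c ≤ b →
    cs.foldl (fun (st : Int × Int) c =>
        if PySem.Chars.islower c then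
          (if st.2 + 1 > st.1 then st.2 + 1 else st.1, st.2 + 1)
        else (st.1, 0)) (b, c)
      = ((pvBump c (pvRunLens cs)).foldl max b, (pvBump c (pvRunLens cs)).getLastD 0) := by
  rw [pvRunLens_eq]; exact foldB' cs

theorem fmax (l : List Int) : ∀ (a b : Int), l.foldl max (max a b) = max a (l.foldl max b) := by
  induction l with
  | nil => intro a b; simp
  | cons x l ih =>
    intro a b
    simp only [List.foldl_cons]
    rw [max_assoc, ih a (max b x)]

-- A's second loop: a running maximum over all entries of l but the last
theorem secondLoop (l : List Int) (t : Int) :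
    (PySem.List.pyRange 0 ((l.length : Int) - 1) 1).foldl
      (fun m i => if m ≤ PySem.List.pyGetD l i 0 then PySem.List.pyGetD l i 0 else m) t
    = l.dropLast.foldl max t := by
  by_cases hnil : l = []
  · rw [hnil, PySem.List.pyRange_one_eq_nil (by norm_num)]
    simp
  · have hlen : 0 < l.length := List.length_pos_iff.2 hnil
    have hb : (l.length : Int) - 1 = (l.dropLast.length : Int) := by
      simp [List.length_dropLast]; omega
    rw [hb]
    rw [PySem.List.foldl_congr_mem (PySem.List.pyRange 0 (l.dropLast.length : Int))
      (fun m i => if m ≤ PySem.List.pyGetD l i 0 then PySem.List.pyGetD l i 0 else m)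
      (fun m i => if m ≤ PySem.List.pyGetD l.dropLast i 0 then PySem.List.pyGetD l.dropLast i 0 else m)
      t ?_]
    · rw [PySem.List.foldl_pyRange_zero_pyGetD' l.dropLast 0 (fun m x => if m ≤ x then x else m) t]
      exact PySem.List.foldl_congr_mem _ _ _ _ (by intro acc x _; rw [max_def])
    · intro acc i hi
      dsimp only
      rw [PySem.List.mem_pyRange_one] at hi
      have h2 := PySem.List.pyGetD_eq_getElem l.dropLast (0 : Int) hi.1 hi.2
      have hlt : i < (l.length : Int) := by
        have := hi.2
        simp [List.length_dropLast] at this ⊢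
        omega
      have h3 := PySem.List.pyGetD_eq_getElem l (0 : Int) hi.1 hlt
      have h4 : i.toNat < l.dropLast.length := by
        have := hi.2; omega
      rw [h2, h3]
      have h5 : l.dropLast[i.toNat] = l[i.toNat] := List.getElem_dropLast h4
      rw [h5]

-- characterisation of A: maximum over the trailing run and all completed runs but the last
theorem charA (mdp : String) :
    longMin mdp = ((pvRunLens mdp.toList).dropLast.dropLast).foldl max
      ((pvRunLens mdp.toList).getLastD 0) := by
  unfold longMin
  rw [foldA mdp.toList [] 0, pvBump_zero]
  simp only [List.nil_append]
  exact secondLoop _ _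

-- two pure arithmetic facts about max, used below
theorem max_absorb (a b c : Int) (h : c ≤ max a b) : max a b = max (max b c) a := by omega

theorem max_ne (a b c : Int) (h1 : a < c) (h2 : b < c) : max a b ≠ max (max b c) a := by omega

-- characterisation of B: maximum over all runs
theorem charB (mdp : String) :
    longMin_alt mdp = (pvRunLens mdp.toList).foldl max 0 := by
  unfold longMin_alt
  rw [foldB mdp.toList 0 0 le_rfl le_rfl, pvBump_zero]

theorem exists_two (l : List Int) (h : 2 ≤ l.length) : ∃ ys x t, l = ys ++ [x, t] := by
  rcases l.eq_nil_or_concat with h1 | ⟨l', t, h1⟩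
  · rw [h1] at h; simp at h
  · rcases l'.eq_nil_or_concat with h2 | ⟨ys, x, h2⟩
    · rw [h1, h2] at h; simp at h
    · exact ⟨ys, x, t, by simp [h1, h2]⟩

-- the two characterised values, given the run decomposition ends with [x, t]
theorem main_char (mdp : String) (ys : List Int) (x t : Int)
    (h : pvRunLens mdp.toList = ys ++ [x, t]) :
    longMin mdp = max t (ys.foldl max 0) ∧
      longMin_alt mdp = max (max (ys.foldl max 0) x) t := by
  have hdrop : (pvRunLens mdp.toList).dropLast.dropLast = ys := by
    rw [h, show ys ++ [x, t] = (ys ++ [x]) ++ [t] by simp,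
      List.dropLast_concat, List.dropLast_concat]
  have hlast : (pvRunLens mdp.toList).getLastD 0 = t := by
    rw [h, show ys ++ [x, t] = (ys ++ [x]) ++ [t] by simp]; simp
  have h0t : 0 ≤ t := pvRunLens_nonneg mdp.toList t (by rw [h]; simp)
  constructor
  · rw [charA, hdrop, hlast]
    have := fmax ys t 0
    rw [show max t 0 = t by omega] at this
    exact this
  · rw [charB, h, List.foldl_append]
    simp only [List.foldl_cons, List.foldl_nil]

theorem D_iff (mdp : String) (ys : List Int) (x t : Int)
    (h : pvRunLens mdp.toList = ys ++ [x, t]) :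
    D_longMin mdp ↔ (t < x ∧ ∀ y ∈ ys, y < x) := by
  unfold D_longMin
  rw [h]
  have h1 : (ys ++ [x, t]).dropLast = ys ++ [x] := by
    rw [show ys ++ [x, t] = (ys ++ [x]) ++ [t] by simp, List.dropLast_concat]
  have h2 : (ys ++ [x, t]).getLastD 0 = t := by
    rw [show ys ++ [x, t] = (ys ++ [x]) ++ [t] by simp]; simp
  rw [h1, h2, List.dropLast_concat]
  simp only [List.getLastD_concat, List.length_append, List.length_cons, List.length_nil]
  constructor
  · rintro ⟨-, h3, h4⟩; exact ⟨h3, h4⟩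
  · rintro ⟨h3, h4⟩; exact ⟨by omega, h3, h4⟩

theorem main_eq (mdp : String) (h : ¬ D_longMin mdp) : longMin mdp = longMin_alt mdp := by
  rcases Nat.lt_or_ge (pvRunLens mdp.toList).length 2 with hlen | hlen
  · -- at most one run entry: both sides are the trailing run
    obtain ⟨r, rs, hr⟩ := List.exists_cons_of_ne_nil (pvRunLens_ne_nil mdp.toList)
    have hrs : rs = [] := by
      rw [hr] at hlen; cases rs with
      | nil => rfl
      | cons a l => simp at hlen
    rw [hrs] at hr
    have h0r : 0 ≤ r := pvRunLens_nonneg mdp.toList r (by rw [hr]; simp)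
    rw [charA, charB, hr]
    simp
    omega
  · obtain ⟨ys, x, t, hsplit⟩ := exists_two _ hlen
    obtain ⟨hA, hB⟩ := main_char mdp ys x t hsplit
    rw [hA, hB]
    rw [D_iff mdp ys x t hsplit] at h
    push Not at h
    have hM := PySem.List.le_foldl_max ys 0
    apply max_absorb
    by_cases hxt : t < x
    · obtain ⟨y, hy, hxy⟩ := h hxt
      have h2 := hM.2 y hy
      have h3 : x ≤ ys.foldl max 0 := le_trans hxy h2
      omega
    · omega

theorem main_ne (mdp : String) (h : D_longMin mdp) : longMin mdp ≠ longMin_alt mdp := by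
  obtain ⟨ys, x, t, hsplit⟩ := exists_two _ h.1
  obtain ⟨hA, hB⟩ := main_char mdp ys x t hsplit
  rw [hA, hB]
  rw [D_iff mdp ys x t hsplit] at h
  obtain ⟨hxt, hys⟩ := h
  have h0t : 0 ≤ t := pvRunLens_nonneg mdp.toList t (by rw [hsplit]; simp)
  have hM := PySem.List.le_foldl_max ys 0
  have hMlt : ys.foldl max 0 < x := by
    rcases PySem.List.foldl_max_mem ys 0 with h1 | h1
    · omega
    · have := hys _ h1; omega
  exact max_ne t (ys.foldl max 0) x hxt hMlt

-- ===== VERDICT (by name: the statements are the Claim_ definitions above) =====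
theorem longMin_spec : Claim_unchanged_longMin := by
  intro mdp _ hD
  exact main_eq mdp hD

theorem longMin_changed : Claim_changed_longMin := by
  unfold Claim_changed_longMin; decide

theorem longMin_tight : Claim_exact_longMin := by
  intro mdp _ hD
  exact main_ne mdp hD
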